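-- pv_equiv track=rewrite | github.com/DwijanX/CuatelaInteligente | Src/playDecider.py | __checkFourthWinCond
-- ===== SOURCE A (Python) =====
-- def __checkFourthWinCond(playerCoords, dim): ##aligned in columns
--     utility=0
--     won=True
--     counter=0
--     for i in range(dim):
--         if i+1==dim:
--             break
--         if playerCoords[i][0]+1!=playerCoords[i+1][0] or playerCoords[i][1]!=playerCoords[i+1][1]:
--             won=False
--         else:
--             utility+=1+counter
--             counter+=10
--     return won,utility
-- ===== SOURCE B (Python) =====
-- def __checkFourthWinCond(playerCoords, dim):  # aligned in columns
--     # Count adjacent column-aligned pairs in one pass, then use closed forms.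
--     m = 0
--     for i in range(dim - 1):
--         if playerCoords[i][0] + 1 == playerCoords[i + 1][0] and playerCoords[i][1] == playerCoords[i + 1][1]:
--             m += 1
--     return m == max(dim - 1, 0), m + 5 * m * (m - 1)
-- ===== Notes on version B (the rewrite author's own statement) =====
-- stated objective: simpler
-- what changed: B replaces the running won/utility/counter accumulators and the in-loop break with a single count m of matching adjacent pairs over range(dim-1), then returns won = (m == max(dim-1,0)) and the closed form utility = m + 5*m*(m-1).
import Mathlib
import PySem

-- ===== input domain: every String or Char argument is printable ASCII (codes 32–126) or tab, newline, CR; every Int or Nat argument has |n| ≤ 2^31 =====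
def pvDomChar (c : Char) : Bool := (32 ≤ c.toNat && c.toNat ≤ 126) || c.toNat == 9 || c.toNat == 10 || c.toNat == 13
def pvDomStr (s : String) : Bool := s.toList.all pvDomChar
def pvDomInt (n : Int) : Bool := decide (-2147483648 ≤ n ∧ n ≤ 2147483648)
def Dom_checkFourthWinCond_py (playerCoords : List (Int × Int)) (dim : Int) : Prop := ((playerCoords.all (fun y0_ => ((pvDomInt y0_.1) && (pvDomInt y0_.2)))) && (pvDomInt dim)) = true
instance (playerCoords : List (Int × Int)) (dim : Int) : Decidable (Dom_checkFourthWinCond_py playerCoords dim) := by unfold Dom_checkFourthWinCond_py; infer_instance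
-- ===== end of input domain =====

-- B replaces A's running won/utility/counter accumulators (with an in-loop break) by a single
-- count of matching adjacent pairs followed by closed-form formulas; objective: simpler.

-- ===== PORT A =====
-- loop over the indices of range(dim) with early exit (break) and IndexError modelled by
-- returning the current state only outside Pre_ (pyGet? = none is unreachable inside Pre_)
def pvALoop (playerCoords : List (Int × Int)) (dim : Int) :
    List Int → Int × Bool × Int → Int × Bool × Int
  | [], s => s
  | i :: rest, (utility, won, counter) =>
    if i + 1 == dim then (utility, won, counter)   -- break
    else
      match PySem.List.pyGet? playerCoords i, PySem.List.pyGet? playerCoords (i + 1) with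
      | some p, some q =>
          if p.1 + 1 != q.1 || p.2 != q.2 then
            pvALoop playerCoords dim rest (utility, false, counter)
          else
            pvALoop playerCoords dim rest (utility + 1 + counter, won, counter + 10)
      | _, _ => (utility, won, counter)            -- IndexError: excluded by Pre_

def checkFourthWinCond_py (playerCoords : List (Int × Int)) (dim : Int) : Bool × Int :=
  let r := pvALoop playerCoords dim (PySem.List.pyRange 0 dim 1) (0, true, 0)
  (r.2.1, r.1)

-- ===== PORT B =====
def checkFourthWinCond_py_alt (playerCoords : List (Int × Int)) (dim : Int) : Bool × Int :=
  let m := (PySem.List.pyRange 0 (dim - 1) 1).foldl (fun m i =>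
    match PySem.List.pyGet? playerCoords i, PySem.List.pyGet? playerCoords (i + 1) with
    | some p, some q => if p.1 + 1 == q.1 && p.2 == q.2 then m + 1 else m
    | _, _ => m) 0
  (m == max (dim - 1) 0, m + 5 * m * (m - 1))

-- ===== PRECONDITION & SPEC =====
-- Pre_ excludes exactly the inputs where A raises IndexError: dim ≥ 2 with fewer than dim coords.
def Pre_checkFourthWinCond_py (playerCoords : List (Int × Int)) (dim : Int) : Prop :=
  dim ≤ 1 ∨ dim ≤ playerCoords.length
instance (playerCoords : List (Int × Int)) (dim : Int) : Decidable (Pre_checkFourthWinCond_py playerCoords dim) := by unfold Pre_checkFourthWinCond_py; infer_instance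
def pvWitness_checkFourthWinCond_py : (List (Int × Int)) × Int := ([(1, 2), (2, 2), (3, 2)], 3)

def Spec_checkFourthWinCond_py (playerCoords : List (Int × Int)) (dim : Int) (out : Bool × Int) : Prop := out = checkFourthWinCond_py_alt playerCoords dim
instance (playerCoords : List (Int × Int)) (dim : Int) (out : Bool × Int) : Decidable (Spec_checkFourthWinCond_py playerCoords dim out) := by unfold Spec_checkFourthWinCond_py; infer_instance

-- ===== CLAIM (what is proved, stated in full; the proofs are below) =====
def Claim_equal_checkFourthWinCond_py : Prop := ∀ (playerCoords : List (Int × Int)) (dim : Int), Dom_checkFourthWinCond_py playerCoords dim → Pre_checkFourthWinCond_py playerCoords dim → Spec_checkFourthWinCond_py playerCoords dim (checkFourthWinCond_py playerCoords dim)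

-- ===== LEMMAS AND PROOFS =====

-- the per-index match test shared by the analysis
def pvMatch (playerCoords : List (Int × Int)) (i : Int) : Bool :=
  match PySem.List.pyGet? playerCoords i, PySem.List.pyGet? playerCoords (i + 1) with
  | some p, some q => p.1 + 1 == q.1 && p.2 == q.2
  | _, _ => false

def pvF (pc : List (Int × Int)) : Int → Int → Int := fun m i =>
  match PySem.List.pyGet? pc i, PySem.List.pyGet? pc (i + 1) with
  | some p, some q => if p.1 + 1 == q.1 && p.2 == q.2 then m + 1 else m
  | _, _ => m

def pvCnt (pc : List (Int × Int)) (L : List Int) : Int := L.foldl (pvF pc) 0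

lemma pvF_eq (pc : List (Int × Int)) (a j : Int) :
    pvF pc a j = a + (if pvMatch pc j then 1 else 0) := by
  unfold pvF pvMatch
  rcases h1 : PySem.List.pyGet? pc j with _ | p <;>
    rcases h2 : PySem.List.pyGet? pc (j + 1) with _ | q <;>
    simp <;> split_ifs <;> omega

lemma foldl_pvF (pc : List (Int × Int)) :
    ∀ (L : List Int) (a : Int), L.foldl (pvF pc) a = a + pvCnt pc L := by
  intro L
  induction L with
  | nil => intro a; simp [pvCnt]
  | cons j L ih =>
    intro a
    have hc : pvCnt pc (j :: L) = pvF pc 0 j + pvCnt pc L := by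
      show List.foldl (pvF pc) 0 (j :: L) = _
      rw [List.foldl_cons, ih]
    rw [List.foldl_cons, ih, hc, pvF_eq, pvF_eq]
    omega

lemma pvCnt_cons (pc : List (Int × Int)) (i : Int) (L : List Int) :
    pvCnt pc (i :: L) = pvCnt pc L + (if pvMatch pc i then 1 else 0) := by
  have hc : pvCnt pc (i :: L) = pvF pc 0 i + pvCnt pc L := by
    show List.foldl (pvF pc) 0 (i :: L) = _
    rw [List.foldl_cons, foldl_pvF]
  rw [hc, pvF_eq]
  omega

lemma pvCnt_le_length (pc : List (Int × Int)) (L : List Int) : pvCnt pc L ≤ L.length := by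
  induction L with
  | nil => simp [pvCnt]
  | cons i L ih => rw [pvCnt_cons]; simp only [List.length_cons]; split_ifs <;> push_cast <;> omega

-- main invariant: processing L ++ [dim-1] (the break index last) from state (u, w, c)
lemma pvALoop_cons (pc : List (Int × Int)) (dim i : Int) (rest : List Int) (u c : Int) (w : Bool)
    (p q : Int × Int)
    (hne : i + 1 ≠ dim) (hp : PySem.List.pyGet? pc i = some p)
    (hq : PySem.List.pyGet? pc (i + 1) = some q) :
    pvALoop pc dim (i :: rest) (u, w, c) =
      if p.1 + 1 == q.1 && p.2 == q.2 then pvALoop pc dim rest (u + 1 + c, w, c + 10)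
      else pvALoop pc dim rest (u, false, c) := by
  rw [pvALoop]
  simp only [hp, hq, hne, beq_iff_eq]
  rcases Decidable.em (p.1 + 1 = q.1 ∧ p.2 = q.2) with h | h
  · simp [h.1, h.2]
  · have h1 : (p.1 + 1 != q.1 || p.2 != q.2) = true := by
      rcases Decidable.em (p.1 + 1 = q.1) with h1 | h1
      · simp [h1]; intro h2; exact h ⟨h1, h2⟩
      · simp [h1]
    have h2 : (p.1 + 1 == q.1 && p.2 == q.2) = false := by
      simp; intro h1 h2; exact h ⟨h1, h2⟩
    simp [h1, h2]

lemma pvALoop_eq (pc : List (Int × Int)) (dim : Int) :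
    ∀ (L : List Int) (u c : Int) (w : Bool),
      (∀ i ∈ L, i + 1 ≠ dim ∧ (PySem.List.pyGet? pc i).isSome ∧ (PySem.List.pyGet? pc (i + 1)).isSome) →
      pvALoop pc dim (L ++ [dim - 1]) (u, w, c) =
        (u + (c + 1) * pvCnt pc L + 5 * pvCnt pc L * (pvCnt pc L - 1),
         w && decide (pvCnt pc L = L.length),
         c + 10 * pvCnt pc L) := by
  intro L
  induction L with
  | nil =>
    intro u c w _
    simp [pvALoop, pvCnt]
  | cons i L ih =>
    intro u c w hL
    obtain ⟨hne, h1, h2⟩ := hL i (by simp)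
    have hL' : ∀ j ∈ L, j + 1 ≠ dim ∧ (PySem.List.pyGet? pc j).isSome ∧ (PySem.List.pyGet? pc (j + 1)).isSome :=
      fun j hj => hL j (by simp [hj])
    rcases Option.isSome_iff_exists.mp h1 with ⟨p, hp⟩
    rcases Option.isSome_iff_exists.mp h2 with ⟨q, hq⟩
    rw [List.cons_append, pvALoop_cons pc dim i (L ++ [dim - 1]) u c w p q hne hp hq,
        pvCnt_cons pc i L]
    have hm : pvMatch pc i = (p.1 + 1 == q.1 && p.2 == q.2) := by
      simp [pvMatch, hp, hq]
    have hl := pvCnt_le_length pc L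
    by_cases hmt : (p.1 + 1 == q.1 && p.2 == q.2) = true
    · rw [if_pos hmt, ih (u + 1 + c) (c + 10) w hL', hm, if_pos hmt]
      simp only [Prod.mk.injEq]
      refine ⟨by ring, ?_, by ring⟩
      congr 1
      rw [decide_eq_decide]
      simp only [List.length_cons]
      push_cast
      omega
    · rw [if_neg hmt, ih u c false hL', hm, if_neg hmt]
      simp only [Prod.mk.injEq, Bool.false_and]
      refine ⟨by ring, ?_, by ring⟩
      have hfalse : decide (pvCnt pc L + 0 = ((i :: L).length : Int)) = false := by
        apply decide_eq_false
        simp only [List.length_cons]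
        push_cast
        omega
      rw [hfalse, Bool.and_false]

-- ===== VERDICT (by name: the statement is the Claim_ definition above) =====
theorem checkFourthWinCond_py_spec : Claim_equal_checkFourthWinCond_py := by
  intro pc dim _ hpre
  unfold Spec_checkFourthWinCond_py checkFourthWinCond_py checkFourthWinCond_py_alt
  by_cases hd : dim ≤ 0
  · have hmax : max (dim - 1) 0 = 0 := by omega
    rw [PySem.List.pyRange_one_eq_nil (a := 0) (b := dim) hd,
        PySem.List.pyRange_one_eq_nil (a := 0) (b := dim - 1) (by omega)]
    simp [pvALoop, hmax]
  · push_neg at hd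
    have hsplit : PySem.List.pyRange 0 dim 1 = PySem.List.pyRange 0 (dim - 1) 1 ++ [dim - 1] := by
      have := PySem.List.pyRange_one_succ_right (a := 0) (b := dim - 1) (by omega)
      simpa using this
    set L := PySem.List.pyRange 0 (dim - 1) 1 with hLdef
    have hmem : ∀ i ∈ L, i + 1 ≠ dim ∧ (PySem.List.pyGet? pc i).isSome ∧ (PySem.List.pyGet? pc (i + 1)).isSome := by
      intro i hi
      rw [hLdef, PySem.List.mem_pyRange_one] at hi
      have hLen : dim ≤ (pc.length : Int) := by
        rcases hpre with h | h
        · omega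
        · exact h
      refine ⟨by omega, ?_, ?_⟩ <;>
      · rw [Option.isSome_iff_ne_none, Ne, PySem.List.pyGet?_eq_none_iff, PySem.Raise.InRange]
        push_neg
        omega
    rw [hsplit, pvALoop_eq pc dim L 0 0 true hmem]
    have hlenL : (L.length : Int) = dim - 1 := by
      rw [hLdef, PySem.List.length_pyRange_one]; omega
    have hfold : L.foldl (fun m i =>
        match PySem.List.pyGet? pc i, PySem.List.pyGet? pc (i + 1) with
        | some p, some q => if p.1 + 1 == q.1 && p.2 == q.2 then m + 1 else m
        | _, _ => m) 0 = pvCnt pc L := rfl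
    simp only [hfold, Prod.mk.injEq]
    refine ⟨?_, by ring⟩
    rw [Bool.true_and, show max (dim - 1) 0 = dim - 1 by omega, ← hlenL]
    rw [Bool.eq_iff_iff]
    simp [beq_iff_eq]
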